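-- pv_equiv track=rewrite | github.com/lekovvv-cmd/barcode_decode_app | backend/decoder.py | _is_valid_ean8
-- ===== SOURCE A (Python) =====
-- def _is_valid_ean8(value: str) -> bool:
--     if not value.isdigit() or len(value) != 8:
--         return False
--     digits = [int(c) for c in value]
--     s = 3 * sum(digits[i] for i in range(0, 7, 2)) + sum(
--         digits[i] for i in range(1, 7, 2)
--     )
--     check = (10 - (s % 10)) % 10
--     return check == digits[7]
-- ===== SOURCE B (Python) =====
-- # Table-driven mod-10 DFA: precomputed transition tables replace the arithmetic
-- # even/odd split and check-digit reconstruction.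
-- _T3 = [[(s + 3 * d) % 10 for d in range(10)] for s in range(10)]
-- _T1 = [[(s + d) % 10 for d in range(10)] for s in range(10)]
--
--
-- def _is_valid_ean8(value: str) -> bool:
--     if not value.isdigit() or len(value) != 8:
--         return False
--     state = 0
--     for i, c in enumerate(value):
--         state = (_T3 if i % 2 == 0 else _T1)[state][ord(c) - 48]
--     return state == 0
-- ===== Notes on version B (the rewrite author's own statement) =====
-- stated objective: alternative
-- what changed: B replaces A's even/odd slicing and check-digit reconstruction by a table-driven DFA: two precomputed 10x10 mod-10 transition tables, one state update per character, accepting iff the final state is 0.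
import Mathlib
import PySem

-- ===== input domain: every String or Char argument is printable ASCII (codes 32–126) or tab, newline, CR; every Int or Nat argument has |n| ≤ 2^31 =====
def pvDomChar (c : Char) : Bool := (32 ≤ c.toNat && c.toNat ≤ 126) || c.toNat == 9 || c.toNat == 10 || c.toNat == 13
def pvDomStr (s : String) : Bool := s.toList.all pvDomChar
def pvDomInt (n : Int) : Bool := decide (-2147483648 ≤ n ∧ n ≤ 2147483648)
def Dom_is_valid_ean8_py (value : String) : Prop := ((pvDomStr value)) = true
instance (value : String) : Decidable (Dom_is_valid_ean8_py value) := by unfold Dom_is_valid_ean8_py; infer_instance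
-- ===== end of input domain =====

-- B validates via a precomputed mod-10 transition-table DFA (two 10x10 tables) instead of A's even/odd index split and check-digit reconstruction (alternative decomposition).


-- ===== PORT A =====
def is_valid_ean8_py (value : String) : Bool :=
  if !PySem.Str.strIsdigit value || PySem.Str.len value ≠ 8 then false
  else
    let digits : List Int := value.toList.map (fun c => (PySem.Int.ofChars? [c]).getD 0)
    let s : Int := 3 * ((PySem.List.pyRange 0 7 2).foldl (fun acc i => acc + PySem.List.pyGetD digits i 0) 0)
                 + (PySem.List.pyRange 1 7 2).foldl (fun acc i => acc + PySem.List.pyGetD digits i 0) 0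
    let check : Int := PySem.Int.mod (10 - PySem.Int.mod s 10) 10
    decide (check = PySem.List.pyGetD digits 7 0)

-- ===== PORT B =====
-- module-level tables _T3 / _T1 of Source B
def pvT3 : List (List Int) :=
  (List.range 10).map (fun s => (List.range 10).map (fun d => PySem.Int.mod ((s : Int) + 3 * (d : Int)) 10))
def pvT1 : List (List Int) :=
  (List.range 10).map (fun s => (List.range 10).map (fun d => PySem.Int.mod ((s : Int) + (d : Int)) 10))

-- Python's row[idx] indexing is ported with pyGetD; after the isdigit/len guard both
-- indices (state 0..9, ord(c)-48 ∈ 0..9 on the ASCII domain) are always in range,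
-- so the default is never used and the port is exact on Dom.
def is_valid_ean8_py_alt (value : String) : Bool :=
  if !PySem.Str.strIsdigit value || PySem.Str.len value ≠ 8 then false
  else
    let state : Int := (PySem.List.enumerate value.toList 0).foldl
      (fun st p =>
        PySem.List.pyGetD
          (PySem.List.pyGetD (if PySem.Int.mod p.1 2 = 0 then pvT3 else pvT1) st [])
          ((p.2.toNat : Int) - 48) 0) 0
    decide (state = 0)

-- ===== PRECONDITION & SPEC =====
def Spec_is_valid_ean8_py (value : String) (out : Bool) : Prop := out = is_valid_ean8_py_alt value
instance (value : String) (out : Bool) : Decidable (Spec_is_valid_ean8_py value out) := by unfold Spec_is_valid_ean8_py; infer_instance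

-- ===== CLAIM (what is proved, stated in full; the proofs are below) =====
def Claim_equal_is_valid_ean8_py : Prop := ∀ (value : String), Dom_is_valid_ean8_py value → Spec_is_valid_ean8_py value (is_valid_ean8_py value)

-- ===== LEMMAS AND PROOFS =====

lemma char_eq_of_toNat (c d : Char) (h : c.toNat = d.toNat) : c = d := Char.ext (UInt32.toNat_inj.mp h)

lemma digit_mem (c : Char) (h : PySem.Chars.isdigit c = true) :
    c ∈ ['0','1','2','3','4','5','6','7','8','9'] := by
  simp [PySem.Chars.isdigit, Char.le_def] at h
  obtain ⟨h1, h2⟩ := h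
  have h1' : 48 ≤ c.toNat := h1
  have h2' : c.toNat ≤ 57 := h2
  interval_cases hc : c.toNat <;>
    first
    | (have hcc : c = '0' := char_eq_of_toNat c '0' (by rw [hc]; decide); subst hcc; decide)
    | (have hcc : c = '1' := char_eq_of_toNat c '1' (by rw [hc]; decide); subst hcc; decide)
    | (have hcc : c = '2' := char_eq_of_toNat c '2' (by rw [hc]; decide); subst hcc; decide)
    | (have hcc : c = '3' := char_eq_of_toNat c '3' (by rw [hc]; decide); subst hcc; decide)
    | (have hcc : c = '4' := char_eq_of_toNat c '4' (by rw [hc]; decide); subst hcc; decide)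
    | (have hcc : c = '5' := char_eq_of_toNat c '5' (by rw [hc]; decide); subst hcc; decide)
    | (have hcc : c = '6' := char_eq_of_toNat c '6' (by rw [hc]; decide); subst hcc; decide)
    | (have hcc : c = '7' := char_eq_of_toNat c '7' (by rw [hc]; decide); subst hcc; decide)
    | (have hcc : c = '8' := char_eq_of_toNat c '8' (by rw [hc]; decide); subst hcc; decide)
    | (have hcc : c = '9' := char_eq_of_toNat c '9' (by rw [hc]; decide); subst hcc; decide)

-- for a digit char, int(c) and ord(c)-48 agree and lie in 0..9
lemma digit_val (c : Char) (h : PySem.Chars.isdigit c = true) :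
    (PySem.Int.ofChars? [c]).getD 0 = (c.toNat : Int) - 48 ∧
    0 ≤ (c.toNat : Int) - 48 ∧ (c.toNat : Int) - 48 ≤ 9 := by
  have := digit_mem c h
  fin_cases this <;> refine ⟨by decide, by decide, by decide⟩

lemma t3_lookup (s : Int) (hs0 : 0 ≤ s) (hs1 : s < 10) (d : Int) (hd0 : 0 ≤ d) (hd1 : d < 10) :
    PySem.List.pyGetD (PySem.List.pyGetD pvT3 s []) d 0 = PySem.Int.mod (s + 3 * d) 10 := by
  interval_cases s <;> interval_cases d <;> decide

lemma t1_lookup (s : Int) (hs0 : 0 ≤ s) (hs1 : s < 10) (d : Int) (hd0 : 0 ≤ d) (hd1 : d < 10) :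
    PySem.List.pyGetD (PySem.List.pyGetD pvT1 s []) d 0 = PySem.Int.mod (s + d) 10 := by
  interval_cases s <;> interval_cases d <;> decide

lemma list_len8 {α : Type} (l : List α) (h : l.length = 8) :
    ∃ a b c d e f g h', l = [a,b,c,d,e,f,g,h'] := by
  match l, h with
  | [a,b,c,d,e,f,g,h'], _ => exact ⟨a,b,c,d,e,f,g,h', rfl⟩

-- ===== VERDICT (by name: the statement is the Claim_ definition above) =====
set_option maxRecDepth 8192 in
theorem is_valid_ean8_py_spec : Claim_equal_is_valid_ean8_py := by
  intro value _
  unfold Spec_is_valid_ean8_py is_valid_ean8_py is_valid_ean8_py_alt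
  split_ifs with hguard
  · rfl
  simp only [Bool.or_eq_true, Bool.not_eq_true', decide_eq_true_eq, not_or,
    Bool.not_eq_false] at hguard
  obtain ⟨hd, h8i⟩ := hguard
  have hInt : PySem.Str.len value = 8 := not_not.mp h8i
  have hlen : value.toList.length = 8 := by
    rw [PySem.Str.len_eq] at hInt
    exact_mod_cast hInt
  rw [PySem.Str.strIsdigit_eq] at hd
  have hall : ∀ c ∈ value.toList, PySem.Chars.isdigit c = true := by
    simp only [PySem.Chars.strIsdigit, Bool.and_eq_true, List.all_eq_true] at hd
    exact fun c hc => hd.2 c hc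
  obtain ⟨c0,c1,c2,c3,c4,c5,c6,c7,hl⟩ := list_len8 value.toList hlen
  have hv0 := digit_val c0 (hall c0 (by rw [hl]; simp))
  have hv1 := digit_val c1 (hall c1 (by rw [hl]; simp))
  have hv2 := digit_val c2 (hall c2 (by rw [hl]; simp))
  have hv3 := digit_val c3 (hall c3 (by rw [hl]; simp))
  have hv4 := digit_val c4 (hall c4 (by rw [hl]; simp))
  have hv5 := digit_val c5 (hall c5 (by rw [hl]; simp))
  have hv6 := digit_val c6 (hall c6 (by rw [hl]; simp))
  have hv7 := digit_val c7 (hall c7 (by rw [hl]; simp))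
  obtain ⟨he0, hb0, hc0'⟩ := hv0
  obtain ⟨he1, hb1, hc1'⟩ := hv1
  obtain ⟨he2, hb2, hc2'⟩ := hv2
  obtain ⟨he3, hb3, hc3'⟩ := hv3
  obtain ⟨he4, hb4, hc4'⟩ := hv4
  obtain ⟨he5, hb5, hc5'⟩ := hv5
  obtain ⟨he6, hb6, hc6'⟩ := hv6
  obtain ⟨he7, hb7, hc7'⟩ := hv7
  simp only [hl, List.map_cons, List.map_nil,
    (by decide : PySem.List.pyRange 0 7 2 = [0, 2, 4, 6]),
    (by decide : PySem.List.pyRange 1 7 2 = [1, 3, 5]),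
    PySem.List.enumerate_cons, PySem.List.enumerate_nil,
    List.foldl_cons, List.foldl_nil,
    he0, he1, he2, he3, he4, he5, he6, he7,
    PySem.List.pyGetD_ofNat']
  norm_num
  rw [(by decide : (pvT3[0]?.getD ([] : List Int)) = PySem.List.pyGetD pvT3 0 [])]
  rw [t3_lookup 0 (by norm_num) (by norm_num) _ hb0 (by omega)]
  rw [t1_lookup _ (PySem.Int.mod_nonneg _ (by norm_num)) (PySem.Int.mod_lt _ (by norm_num)) _ hb1 (by omega)]
  rw [t3_lookup _ (PySem.Int.mod_nonneg _ (by norm_num)) (PySem.Int.mod_lt _ (by norm_num)) _ hb2 (by omega)]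
  rw [t1_lookup _ (PySem.Int.mod_nonneg _ (by norm_num)) (PySem.Int.mod_lt _ (by norm_num)) _ hb3 (by omega)]
  rw [t3_lookup _ (PySem.Int.mod_nonneg _ (by norm_num)) (PySem.Int.mod_lt _ (by norm_num)) _ hb4 (by omega)]
  rw [t1_lookup _ (PySem.Int.mod_nonneg _ (by norm_num)) (PySem.Int.mod_lt _ (by norm_num)) _ hb5 (by omega)]
  rw [t3_lookup _ (PySem.Int.mod_nonneg _ (by norm_num)) (PySem.Int.mod_lt _ (by norm_num)) _ hb6 (by omega)]
  rw [t1_lookup _ (PySem.Int.mod_nonneg _ (by norm_num)) (PySem.Int.mod_lt _ (by norm_num)) _ hb7 (by omega)]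
  simp only [PySem.Int.mod_eq_emod_of_pos (by norm_num : (0:Int) < 10)]
  omega
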